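-- pv_equiv track=rewrite | github.com/liuaaron0226/patrick_webapp | patrick_method_solver.py | get_covered_minterms
-- ===== SOURCE A (Python) =====
-- from itertools import combinations, product
--
-- def get_covered_minterms(pi_expr):
--     vars_order = ['A', 'B', 'C', 'D']  # 支援最多四變數
--     covered = set()
--
--     for bits in product([0, 1], repeat=len(vars_order)):
--         terms = [f"{v}'" if b == 0 else v for v, b in zip(vars_order, bits)]
--         if match_pi(pi_expr, terms):
--             idx = int(''.join(map(str, bits)), 2)
--             covered.add(idx)
--     return covered
--
-- def match_pi(pi_expr, term_bits):
--     pi_parts = pi_expr.replace(' ', '').split('+')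
--     for part in pi_parts:
--         if all(t in term_bits for t in split_literals(part)):
--             return True
--     return False
--
-- def split_literals(expr):
--     i = 0
--     literals = []
--     while i < len(expr):
--         if i + 1 < len(expr) and expr[i+1] == "'":
--             literals.append(expr[i:i+2])
--             i += 2
--         else:
--             literals.append(expr[i])
--             i += 1
--     return literals
-- ===== SOURCE B (Python) =====
-- def _compile_part(part):
--     """One pass over the term: returns (fixed, free_weights), or None if the
--     term can never be satisfied (unknown variable or contradictory literals)."""
--     weights = {'A': 8, 'B': 4, 'C': 2, 'D': 1}
--     bits = {}
--     i = 0
--     while i < len(part):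
--         if i + 1 < len(part) and part[i + 1] == "'":
--             v, b, i = part[i], 0, i + 2
--         else:
--             v, b, i = part[i], 1, i + 1
--         if v not in weights or bits.get(v, b) != b:
--             return None
--         bits[v] = b
--     fixed = sum(w for v, w in weights.items() if bits.get(v) == 1)
--     free = [w for v, w in weights.items() if v not in bits]
--     return fixed, free
--
--
-- def get_covered_minterms(pi_expr):
--     # bit-parallel: bit i of `mask` says minterm i is covered
--     mask = 0
--     for part in pi_expr.replace(' ', '').split('+'):
--         c = _compile_part(part)
--         if c is None:
--             continue
--         fixed, free = c
--         pmask = 1 << fixed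
--         for w in free:
--             pmask |= pmask << w
--         mask |= pmask
--     return {i for i in range(16) if mask >> i & 1}
-- ===== Notes on version B (the rewrite author's own statement) =====
-- stated objective: faster
-- what changed: B compiles each plus-separated product term once into a (fixed-bits, free-weights) pair and builds a 16-bit coverage bitmask by shift-or doubling over the free weights, then reads the covered minterms off the mask, instead of A's enumerating all 16 variable assignments and re-tokenizing and string-matching every term against each assignment's literal strings.
import Mathlib
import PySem

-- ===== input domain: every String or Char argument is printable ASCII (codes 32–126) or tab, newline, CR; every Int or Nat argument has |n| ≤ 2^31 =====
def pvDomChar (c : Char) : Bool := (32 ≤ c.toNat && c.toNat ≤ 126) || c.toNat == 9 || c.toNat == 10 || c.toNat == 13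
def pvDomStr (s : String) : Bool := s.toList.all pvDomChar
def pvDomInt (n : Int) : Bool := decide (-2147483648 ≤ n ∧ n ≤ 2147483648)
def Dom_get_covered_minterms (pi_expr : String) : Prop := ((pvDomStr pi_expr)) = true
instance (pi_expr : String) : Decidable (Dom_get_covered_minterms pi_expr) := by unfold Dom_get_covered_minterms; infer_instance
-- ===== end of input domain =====

-- B replaces A's per-minterm enumeration (16 assignments, each re-tokenizing and string-matching every
-- product term) by one compilation pass per term into (fixed, free-weights) constraints and a bit-parallel
-- 16-bit coverage mask built with shift-or doubling; the covered set is read off the mask (objective: faster).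

-- ===== PORT A =====

-- split_literals (A): scan by index, taking two chars when the next char is an apostrophe
def splitLiterals : List Char → List (List Char)
  | [] => []
  | [c] => [[c]]
  | c1 :: c2 :: rest =>
      if c2 = '\'' then [c1, c2] :: splitLiterals rest
      else [c1] :: splitLiterals (c2 :: rest)

-- match_pi (A): any part all of whose literals appear among the minterm's term strings
def matchPi (pi_expr : String) (term_bits : List (List Char)) : Bool :=
  let pi_parts := PySem.Chars.splitOn (PySem.Chars.replace pi_expr.toList [' '] []) ['+']
  pi_parts.any (fun part => (splitLiterals part).all (fun t => term_bits.contains t))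

-- itertools.product([0,1], repeat=n): leftmost coordinate varies slowest
def product01 : Nat → List (List Int)
  | 0 => [[]]
  | n + 1 => ([0, 1] : List Int).flatMap (fun b => (product01 n).map (fun t => b :: t))

def get_covered_minterms (pi_expr : String) : List Int :=
  let vars_order : List (List Char) := [['A'], ['B'], ['C'], ['D']]
  (product01 vars_order.length).foldl
    (fun (covered : PySem.Set Int) bits =>
      let terms := (vars_order.zip bits).map (fun vb => if vb.2 == 0 then vb.1 ++ ['\''] else vb.1)
      if matchPi pi_expr terms then
        -- int(''.join(map(str, bits)), 2); never a ValueError here (digits are 0/1), so getD 0 is exact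
        covered.add ((PySem.Int.ofCharsBase? ((bits.map PySem.Int.toChars).flatten) 2).getD 0)
      else covered)
    PySem.Set.empty

-- ===== PORT B =====

-- the literal dict weights = {'A': 8, 'B': 4, 'C': 2, 'D': 1} as its items in insertion order
def bWeights : List (Char × Int) := [('A', 8), ('B', 4), ('C', 2), ('D', 1)]

-- _compile_part's while loop (B): tokenize and fill the bits dict; none = `return None`
-- (`v not in weights or bits.get(v, b) != b`, negated, is the guard)
def compileGo : List Char → PySem.Dict Char Int → Option (PySem.Dict Char Int)
  | [], bits => some bits
  | [c], bits =>
      if bWeights.any (fun vw => vw.1 == c) && ((bits.get? c).getD 1 == 1) then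
        some (bits.insert c 1)
      else none
  | c1 :: c2 :: rest, bits =>
      if c2 = '\'' then
        if bWeights.any (fun vw => vw.1 == c1) && ((bits.get? c1).getD 0 == 0) then
          compileGo rest (bits.insert c1 0)
        else none
      else
        if bWeights.any (fun vw => vw.1 == c1) && ((bits.get? c1).getD 1 == 1) then
          compileGo (c2 :: rest) (bits.insert c1 1)
        else none

-- _compile_part (B): the loop, then fixed = Σ weights of positive vars, free = weights of unmentioned vars
def compilePart (part : List Char) : Option (Int × List Int) :=
  match compileGo part PySem.Dict.empty with
  | none => none
  | some bits =>
      let fixed := bWeights.foldl (fun s vw => if bits.get? vw.1 == some 1 then s + vw.2 else s) 0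
      let free := (bWeights.filter (fun vw => !(bits.contains vw.1))).map (·.2)
      some (fixed, free)

def get_covered_minterms_alt (pi_expr : String) : List Int :=
  let parts := PySem.Chars.splitOn (PySem.Chars.replace pi_expr.toList [' '] []) ['+']
  let mask := parts.foldl (fun (mask : Nat) part =>
      match compilePart part with
      | none => mask
      | some c =>
          -- fixed ≥ 0 and the free weights are 1/2/4/8, so .toNat is exact here
          let pmask := c.2.foldl (fun p w => p ||| (p <<< w.toNat)) ((1 : Nat) <<< c.1.toNat)
          mask ||| pmask) 0
  (PySem.List.pyRange 0 16 1).foldl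
    (fun (covered : PySem.Set Int) i =>
      if (mask >>> i.toNat) &&& 1 == 1 then covered.add i else covered)
    PySem.Set.empty

-- ===== PRECONDITION & SPEC =====
def Spec_get_covered_minterms (pi_expr : String) (out : List Int) : Prop := out = get_covered_minterms_alt pi_expr
instance (pi_expr : String) (out : List Int) : Decidable (Spec_get_covered_minterms pi_expr out) := by unfold Spec_get_covered_minterms; infer_instance

-- ===== CLAIM (what is proved, stated in full; the proofs are below) =====
def Claim_equal_get_covered_minterms : Prop := ∀ (pi_expr : String), Dom_get_covered_minterms pi_expr → Spec_get_covered_minterms pi_expr (get_covered_minterms pi_expr)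

-- ===== LEMMAS AND PROOFS =====

-- A's term strings for the minterm with bits b3 b2 b1 b0 (in A,B,C,D order)
def termsOf (b3 b2 b1 b0 : Int) : List (List Char) :=
  [if b3 == 0 then ['A', '\''] else ['A'],
   if b2 == 0 then ['B', '\''] else ['B'],
   if b1 == 0 then ['C', '\''] else ['C'],
   if b0 == 0 then ['D', '\''] else ['D']]

-- the minterm index encoded by a 4-bit list
def idxOf : List Int → Int
  | [b3, b2, b1, b0] => 8*b3 + 4*b2 + 2*b1 + b0
  | _ => 0

-- the bits dict agrees with the minterm (each recorded polarity matches)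
def consistent (b3 b2 b1 b0 : Int) (d : PySem.Dict Char Int) : Bool :=
  ((d.get? 'A').getD b3 == b3) && ((d.get? 'B').getD b2 == b2) &&
    ((d.get? 'C').getD b1 == b1) && ((d.get? 'D').getD b0 == b0)

-- every value the loop ever stores is 0 or 1
def WellVals (d : PySem.Dict Char Int) : Prop :=
  (d.get? 'A' = none ∨ d.get? 'A' = some 0 ∨ d.get? 'A' = some 1) ∧
  (d.get? 'B' = none ∨ d.get? 'B' = some 0 ∨ d.get? 'B' = some 1) ∧
  (d.get? 'C' = none ∨ d.get? 'C' = some 0 ∨ d.get? 'C' = some 1) ∧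
  (d.get? 'D' = none ∨ d.get? 'D' = some 0 ∨ d.get? 'D' = some 1)

-- the part mask B computes from a final bits dict
def pmaskOfD (d : PySem.Dict Char Int) : Nat :=
  ((bWeights.filter (fun (vw : Char × Int) => !(d.contains vw.1))).map (·.2)).foldl
    (fun p w => p ||| (p <<< w.toNat))
    ((1 : Nat) <<< (bWeights.foldl (fun (s : Int) (vw : Char × Int) => if d.get? vw.1 == some 1 then s + vw.2 else s) 0).toNat)

def partMask (part : List Char) : Nat :=
  match compileGo part PySem.Dict.empty with
  | none => 0
  | some d => pmaskOfD d

theorem ins_eq (b3 b2 b1 b0 : Int)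
    (h3 : b3 = 0 ∨ b3 = 1) (h2 : b2 = 0 ∨ b2 = 1) (h1 : b1 = 0 ∨ b1 = 1) (h0 : b0 = 0 ∨ b0 = 1)
    (d : PySem.Dict Char Int) (c : Char) (b : Int) (hb : b = 0 ∨ b = 1)
    (hg : (bWeights.any (fun vw => vw.1 == c) && ((d.get? c).getD b == b)) = true) :
    consistent b3 b2 b1 b0 (d.insert c b)
      = (consistent b3 b2 b1 b0 d
          && (termsOf b3 b2 b1 b0).contains (if b == 0 then [c, '\''] else [c])) := by
  simp only [bWeights, List.any_cons, List.any_nil, Bool.or_false, Bool.and_eq_true,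
    Bool.or_eq_true, beq_iff_eq] at hg
  obtain ⟨hc, hv⟩ := hg
  rcases hc with hc | hc | hc | hc <;> subst hc <;>
    [cases hget : d.get? 'A'; cases hget : d.get? 'B'; cases hget : d.get? 'C';
     cases hget : d.get? 'D'] <;>
    rw [hget] at hv <;>
    (try (simp only [Option.getD_some, beq_iff_eq] at hv; subst hv)) <;>
    rcases hb with rfl | rfl <;> rcases h3 with rfl | rfl <;> rcases h2 with rfl | rfl <;>
    rcases h1 with rfl | rfl <;> rcases h0 with rfl | rfl <;>
    simp [consistent, termsOf, PySem.Dict.get?_insert, hget]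

theorem ins_ne (b3 b2 b1 b0 : Int)
    (h3 : b3 = 0 ∨ b3 = 1) (h2 : b2 = 0 ∨ b2 = 1) (h1 : b1 = 0 ∨ b1 = 1) (h0 : b0 = 0 ∨ b0 = 1)
    (d : PySem.Dict Char Int) (c : Char) (b : Int) (hb : b = 0 ∨ b = 1)
    (hg : (bWeights.any (fun vw => vw.1 == c) && ((d.get? c).getD b == b)) = false) :
    (consistent b3 b2 b1 b0 d
        && (termsOf b3 b2 b1 b0).contains (if b == 0 then [c, '\''] else [c])) = false := by
  by_cases hcv : (bWeights.any (fun vw => vw.1 == c)) = true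
  · rw [hcv, Bool.true_and] at hg
    simp only [bWeights, List.any_cons, List.any_nil, Bool.or_false, Bool.or_eq_true,
      beq_iff_eq] at hcv
    rcases hcv with hc | hc | hc | hc <;> subst hc <;>
      [cases hget : d.get? 'A'; cases hget : d.get? 'B'; cases hget : d.get? 'C';
       cases hget : d.get? 'D'] <;>
      rw [hget] at hg <;>
      (try (simp only [Option.getD_none, beq_self_eq_true] at hg; exact absurd hg (by simp))) <;>
      simp only [Option.getD_some, beq_eq_false_iff_ne, ne_eq] at hg <;>
      rcases hb with rfl | rfl <;> rcases h3 with rfl | rfl <;> rcases h2 with rfl | rfl <;>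
      rcases h1 with rfl | rfl <;> rcases h0 with rfl | rfl <;>
      simp [consistent, termsOf, hget, hg]
  · have hcv' : ¬('A' = c ∨ 'B' = c ∨ 'C' = c ∨ 'D' = c) := by
      intro h
      apply hcv
      simp only [bWeights, List.any_cons, List.any_nil, Bool.or_false, Bool.or_eq_true,
        beq_iff_eq]
      exact h
    have hA : c ≠ 'A' := fun h => hcv' (Or.inl h.symm)
    have hB : c ≠ 'B' := fun h => hcv' (Or.inr (Or.inl h.symm))
    have hC : c ≠ 'C' := fun h => hcv' (Or.inr (Or.inr (Or.inl h.symm)))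
    have hD : c ≠ 'D' := fun h => hcv' (Or.inr (Or.inr (Or.inr h.symm)))
    rcases hb with rfl | rfl <;> rcases h3 with rfl | rfl <;> rcases h2 with rfl | rfl <;>
      rcases h1 with rfl | rfl <;> rcases h0 with rfl | rfl <;>
      simp [termsOf, consistent, hA, hB, hC, hD]

theorem parse_eq (b3 b2 b1 b0 : Int)
    (h3 : b3 = 0 ∨ b3 = 1) (h2 : b2 = 0 ∨ b2 = 1) (h1 : b1 = 0 ∨ b1 = 1) (h0 : b0 = 0 ∨ b0 = 1)
    (part : List Char) (d : PySem.Dict Char Int) :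
    (match compileGo part d with
     | none => false
     | some d' => consistent b3 b2 b1 b0 d')
    = (consistent b3 b2 b1 b0 d
        && (splitLiterals part).all (fun t => (termsOf b3 b2 b1 b0).contains t)) := by
  induction part, d using compileGo.induct with
  | case1 bits => simp [compileGo, splitLiterals]
  | case2 c bits h =>
      have e := ins_eq b3 b2 b1 b0 h3 h2 h1 h0 bits c 1 (Or.inr rfl) h
      simp only [show ((1:Int) == 0) = false from rfl, Bool.false_eq_true, if_false] at e
      simp [compileGo, h, splitLiterals, e]
  | case3 c bits h =>
      have hg : (bWeights.any (fun vw => vw.1 == c) && ((bits.get? c).getD 1 == 1)) = false := by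
        revert h; cases (bWeights.any (fun vw => vw.1 == c) && ((bits.get? c).getD 1 == 1)) <;> simp
      have e := ins_ne b3 b2 b1 b0 h3 h2 h1 h0 bits c 1 (Or.inr rfl) hg
      simp only [show ((1:Int) == 0) = false from rfl, Bool.false_eq_true, if_false] at e
      rw [show compileGo [c] bits = none from by simp [compileGo, h]]
      simp only [splitLiterals, List.all_cons, List.all_nil, Bool.and_true]
      exact e.symm
  | case4 c1 rest bits h ih =>
      have e := ins_eq b3 b2 b1 b0 h3 h2 h1 h0 bits c1 0 (Or.inl rfl) h
      simp only [show ((0:Int) == 0) = true from rfl, if_true] at e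
      simp only [compileGo, if_pos rfl, h, if_true, ih, e, splitLiterals, List.all_cons]
      ac_rfl
  | case5 c1 rest bits h =>
      have hg : (bWeights.any (fun vw => vw.1 == c1) && ((bits.get? c1).getD 0 == 0)) = false := by
        revert h; cases (bWeights.any (fun vw => vw.1 == c1) && ((bits.get? c1).getD 0 == 0)) <;> simp
      have e := ins_ne b3 b2 b1 b0 h3 h2 h1 h0 bits c1 0 (Or.inl rfl) hg
      simp only [show ((0:Int) == 0) = true from rfl, if_true] at e
      rw [show compileGo (c1 :: '\'' :: rest) bits = none from by simp [compileGo, h]]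
      simp only [splitLiterals, if_true, List.all_cons]
      rw [← Bool.and_assoc, e, Bool.false_and]
  | case6 c1 c2 rest bits hne h ih =>
      have e := ins_eq b3 b2 b1 b0 h3 h2 h1 h0 bits c1 1 (Or.inr rfl) h
      simp only [show ((1:Int) == 0) = false from rfl, Bool.false_eq_true, if_false] at e
      simp only [compileGo, if_neg hne, h, if_true, ih, e, splitLiterals, List.all_cons]
      ac_rfl
  | case7 c1 c2 rest bits hne h =>
      have hg : (bWeights.any (fun vw => vw.1 == c1) && ((bits.get? c1).getD 1 == 1)) = false := by
        revert h; cases (bWeights.any (fun vw => vw.1 == c1) && ((bits.get? c1).getD 1 == 1)) <;> simp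
      have e := ins_ne b3 b2 b1 b0 h3 h2 h1 h0 bits c1 1 (Or.inr rfl) hg
      simp only [show ((1:Int) == 0) = false from rfl, Bool.false_eq_true, if_false] at e
      rw [show compileGo (c1 :: c2 :: rest) bits = none from by simp [compileGo, hne, h]]
      simp only [splitLiterals, if_neg hne, List.all_cons]
      rw [← Bool.and_assoc, e, Bool.false_and]

theorem wellVals_empty : WellVals PySem.Dict.empty := by
  refine ⟨?_, ?_, ?_, ?_⟩ <;> simp [PySem.Dict.get?_empty]

theorem wellVals_insert (d : PySem.Dict Char Int) (hW : WellVals d) (c : Char) (b : Int)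
    (hb : b = 0 ∨ b = 1) : WellVals (d.insert c b) := by
  obtain ⟨hA, hB, hC, hD⟩ := hW
  rcases hb with rfl | rfl <;>
    (refine ⟨?_, ?_, ?_, ?_⟩ <;> simp only [PySem.Dict.get?_insert] <;> split_ifs <;> tauto)

theorem compileGo_well (part : List Char) (d : PySem.Dict Char Int) :
    ∀ d', compileGo part d = some d' → WellVals d → WellVals d' := by
  induction part, d using compileGo.induct with
  | case1 bits =>
      intro d' h hW
      simp only [compileGo, Option.some.injEq] at h
      rwa [← h]
  | case2 c bits hg =>
      intro d' h hW
      simp only [compileGo, hg, if_true, Option.some.injEq] at h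
      rw [← h]
      exact wellVals_insert _ hW _ _ (Or.inr rfl)
  | case3 c bits hg =>
      intro d' h hW
      simp [compileGo, hg] at h
  | case4 c1 rest bits hg ih =>
      intro d' h hW
      rw [show compileGo (c1 :: '\'' :: rest) bits = compileGo rest (bits.insert c1 0) from by
        simp [compileGo, hg]] at h
      exact ih d' h (wellVals_insert _ hW _ _ (Or.inl rfl))
  | case5 c1 rest bits hg =>
      intro d' h hW
      simp [compileGo, hg] at h
  | case6 c1 c2 rest bits hne hg ih =>
      intro d' h hW
      rw [show compileGo (c1 :: c2 :: rest) bits = compileGo (c2 :: rest) (bits.insert c1 1) from by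
        simp [compileGo, hne, hg]] at h
      exact ih d' h (wellVals_insert _ hW _ _ (Or.inr rfl))
  | case7 c1 c2 rest bits hne hg =>
      intro d' h hW
      simp [compileGo, hne, hg] at h

def bitOn (m k : Nat) : Bool := (m >>> k) &&& 1 == 1

set_option maxHeartbeats 2000000 in
theorem mask_eq (b3 b2 b1 b0 : Int)
    (h3 : b3 = 0 ∨ b3 = 1) (h2 : b2 = 0 ∨ b2 = 1) (h1 : b1 = 0 ∨ b1 = 1) (h0 : b0 = 0 ∨ b0 = 1)
    (d : PySem.Dict Char Int) (hW : WellVals d) :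
    bitOn (pmaskOfD d) (8*b3 + 4*b2 + 2*b1 + b0).toNat = consistent b3 b2 b1 b0 d := by
  obtain ⟨hA, hB, hC, hD⟩ := hW
  rcases hA with hA | hA | hA <;> rcases hB with hB | hB | hB <;>
    rcases hC with hC | hC | hC <;> rcases hD with hD | hD | hD <;>
    simp [bitOn, pmaskOfD, consistent, bWeights, List.filter_cons,
      PySem.Dict.contains_eq_isSome_get?, hA, hB, hC, hD] <;>
    rcases h3 with rfl | rfl <;> rcases h2 with rfl | rfl <;>
    rcases h1 with rfl | rfl <;> rcases h0 with rfl | rfl <;> decide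

theorem bitOn_or (a b k : Nat) : bitOn (a ||| b) k = (bitOn a k || bitOn b k) := by
  have h1 : ∀ m : Nat, (m &&& 1 == 1) = (1 &&& m != 0) := by
    intro m
    rw [Nat.and_comm 1 m, Nat.and_one_is_mod]
    rcases Nat.mod_two_eq_zero_or_one m with h | h <;> simp [h]
  have ha := Nat.testBit_or a b k
  simp only [Nat.testBit] at ha
  simp only [bitOn, h1]
  exact ha

theorem or_fold (parts : List (List Char)) (m : Nat) (k : Nat) :
    bitOn (parts.foldl (fun m p => m ||| partMask p) m) k
      = (bitOn m k || parts.any (fun p => bitOn (partMask p) k)) := by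
  induction parts generalizing m with
  | nil => simp
  | cons p ps ih =>
      simp only [List.foldl_cons, ih, List.any_cons, bitOn_or, Bool.or_assoc]

theorem consistent_empty (b3 b2 b1 b0 : Int) :
    consistent b3 b2 b1 b0 PySem.Dict.empty = true := by
  simp [consistent, PySem.Dict.get?_empty]

theorem part_cover (b3 b2 b1 b0 : Int)
    (h3 : b3 = 0 ∨ b3 = 1) (h2 : b2 = 0 ∨ b2 = 1) (h1 : b1 = 0 ∨ b1 = 1) (h0 : b0 = 0 ∨ b0 = 1)
    (part : List Char) :
    bitOn (partMask part) (8*b3 + 4*b2 + 2*b1 + b0).toNat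
      = (splitLiterals part).all (fun t => (termsOf b3 b2 b1 b0).contains t) := by
  have hp := parse_eq b3 b2 b1 b0 h3 h2 h1 h0 part PySem.Dict.empty
  rw [consistent_empty, Bool.true_and] at hp
  unfold partMask
  cases hc : compileGo part PySem.Dict.empty with
  | none =>
      rw [hc] at hp
      simp only at hp
      rw [← hp]
      simp [bitOn]
  | some d =>
      rw [hc] at hp
      simp only at hp
      rw [← hp]
      exact mask_eq b3 b2 b1 b0 h3 h2 h1 h0 d
        (compileGo_well part PySem.Dict.empty d hc wellVals_empty)

theorem mask_fold_eq (parts : List (List Char)) (m : Nat) :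
    parts.foldl (fun mask part =>
      match compilePart part with
      | none => mask
      | some c =>
          let pmask := c.2.foldl (fun p w => p ||| (p <<< w.toNat)) ((1 : Nat) <<< c.1.toNat)
          mask ||| pmask) m
    = parts.foldl (fun mask part => mask ||| partMask part) m := by
  induction parts generalizing m with
  | nil => rfl
  | cons p ps ih =>
      simp only [List.foldl_cons]
      rw [ih]
      congr 1
      cases hc : compileGo p PySem.Dict.empty with
      | none => simp [compilePart, hc, partMask]
      | some d => simp [compilePart, hc, partMask, pmaskOfD]

theorem step_eq (pi : String) (cov : PySem.Set Int) (b3 b2 b1 b0 : Int)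
    (h3 : b3 = 0 ∨ b3 = 1) (h2 : b2 = 0 ∨ b2 = 1) (h1 : b1 = 0 ∨ b1 = 1) (h0 : b0 = 0 ∨ b0 = 1) :
    (if matchPi pi ((([['A'],['B'],['C'],['D']] : List (List Char)).zip [b3, b2, b1, b0]).map
          (fun vb => if vb.2 == 0 then vb.1 ++ ['\''] else vb.1)) then
        cov.add ((PySem.Int.ofCharsBase? (([b3, b2, b1, b0].map PySem.Int.toChars).flatten) 2).getD 0)
      else cov) =
    (if ((((PySem.Chars.splitOn (PySem.Chars.replace pi.toList [' '] []) ['+']).foldl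
            (fun mask part => mask ||| partMask part) 0) >>> (8*b3 + 4*b2 + 2*b1 + b0).toNat) &&& 1 == 1) then
        cov.add (8*b3 + 4*b2 + 2*b1 + b0)
      else cov) := by
  have hterm : (([['A'],['B'],['C'],['D']] : List (List Char)).zip [b3, b2, b1, b0]).map
      (fun vb => if vb.2 == 0 then vb.1 ++ ['\''] else vb.1) = termsOf b3 b2 b1 b0 := by
    rcases h3 with rfl | rfl <;> rcases h2 with rfl | rfl <;> rcases h1 with rfl | rfl <;>
      rcases h0 with rfl | rfl <;> decide
  have hidx : (PySem.Int.ofCharsBase? (([b3, b2, b1, b0].map PySem.Int.toChars).flatten) 2).getD 0 =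
      8*b3 + 4*b2 + 2*b1 + b0 := by
    rcases h3 with rfl | rfl <;> rcases h2 with rfl | rfl <;> rcases h1 with rfl | rfl <;>
      rcases h0 with rfl | rfl <;> decide
  rw [hterm, hidx]
  rw [show ∀ X : Nat, ((X >>> (8*b3 + 4*b2 + 2*b1 + b0).toNat) &&& 1 == 1)
        = bitOn X (8*b3 + 4*b2 + 2*b1 + b0).toNat from fun _ => rfl]
  rw [or_fold]
  simp only [show bitOn 0 (8*b3 + 4*b2 + 2*b1 + b0).toNat = false from by simp [bitOn],
    Bool.false_or, part_cover b3 b2 b1 b0 h3 h2 h1 h0]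
  rfl

-- ===== VERDICT (by name: the statement is the Claim_ definition above) =====
theorem get_covered_minterms_spec : Claim_equal_get_covered_minterms := by
  intro pi_expr _
  unfold Spec_get_covered_minterms get_covered_minterms get_covered_minterms_alt
  simp only [mask_fold_eq]
  rw [show PySem.List.pyRange 0 16 1 =
        (product01 ([['A'],['B'],['C'],['D']] : List (List Char)).length).map idxOf from by decide]
  rw [List.foldl_map]
  apply PySem.List.foldl_congr_mem
  intro cov bits hb
  rw [show product01 ([['A'],['B'],['C'],['D']] : List (List Char)).length =
        [[0,0,0,0],[0,0,0,1],[0,0,1,0],[0,0,1,1],[0,1,0,0],[0,1,0,1],[0,1,1,0],[0,1,1,1],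
         [1,0,0,0],[1,0,0,1],[1,0,1,0],[1,0,1,1],[1,1,0,0],[1,1,0,1],[1,1,1,0],[1,1,1,1]] from by decide] at hb
  fin_cases hb <;>
    (rw [step_eq] <;> norm_num [idxOf])
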